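-- pv_equiv track=rewrite | github.com/collinsakenga/codewars_solutions | 5 kyu/Four Letter Words Mutations.py | mutations
-- ===== SOURCE A (Python) =====
-- def mutations(alice, bob, word, first):
--     table1={i:j for i, j in enumerate(alice) if len(j)==len(set(j))}
--     table2={i:j for i, j in enumerate(bob) if len(j)==len(set(j))}
--     if first:
--         table1, table2=table2, table1
--     visited={word}
--     index1, index2=0, 0
--     if not first:
--         while table1 and table2:
--             index1=next((i for i,j in table1.items() if j not in visited and sum(k!=l for k,l in zip(j, word))==1), -1)
--             if index1>=0:
--                 word=table1[index1]
--                 visited.add(word)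
--                 table1.pop(index1)
--             if first and index1>=0 and index2<0:
--                 return 0
--             if first and index2>=0 and index1<0:
--                 return 1
--             first=True
--             index2=next((i for i,j in table2.items() if j not in visited and sum(k!=l for k,l in zip(j, word))==1), -1)
--             if index2>=0:
--                 word=table2[index2]
--                 visited.add(word)
--                 table2.pop(index2)
--             if index2>=0 and index1<0:
--                 return 1
--             if index1>=0 and index2<0:
--                 return 0
--             if index1<0 and index2<0:
--                 return -1
--     else:
--         while table1 and table2:
--             index1=next((i for i,j in table1.items() if j not in visited and sum(k!=l for k,l in zip(j, word))==1), -1)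
--             if index1>=0:
--                 word=table1[index1]
--                 visited.add(word)
--                 table1.pop(index1)
--             if not first and index1>=0 and index2<0:
--                 return 1
--             if not first and index2>=0 and index1<0:
--                 return 0
--             first=False
--             index2=next((i for i,j in table2.items() if j not in visited and sum(k!=l for k,l in zip(j, word))==1), -1)
--             if index2>=0:
--                 word=table2[index2]
--                 visited.add(word)
--                 table2.pop(index2)
--             if index2>=0 and index1<0:
--                 return 0
--             if index1>=0 and index2<0:
--                 return 1
--             if index1<0 and index2<0:
--                 return -1
-- ===== SOURCE B (Python) =====
-- def mutations(alice, bob, word, first):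
--     # Graph formulation: precompute the one-letter-mutation adjacency between all
--     # pooled words once, then play the whole game on integer node ids with boolean
--     # visited marks (propagated to duplicate strings) and pool counters -- the game
--     # loop itself does no string comparisons.
--     pa = [w for w in alice if len(set(w)) == len(w)]
--     pb = [w for w in bob if len(set(w)) == len(w)]
--     words = [word] + pa + pb
--     n = len(words)
--     n1, n2 = len(pa), len(pb)
--
--     def near(a, b):
--         return sum(x != y for x, y in zip(a, b)) == 1
--
--     # adj[u] = (neighbours of u inside alice's pool, inside bob's pool), in pool order
--     adj = [([v for v in range(1, 1 + n1) if near(words[u], words[v])],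
--             [v for v in range(1 + n1, n) if near(words[u], words[v])])
--            for u in range(n)]
--
--     seen = [False] * n
--
--     def mark(c):
--         w = words[c]
--         for v in range(n):
--             if words[v] == w:
--                 seen[v] = True
--
--     def pick(side, u):
--         return next((v for v in adj[u][side] if not seen[v]), None)
--
--     mark(0)
--     id1, id2 = (1, 0) if first else (0, 1)
--     alive = [n1, n2]  # remaining words per side (0 = alice, 1 = bob)
--     cur = 0
--     first_round = True
--     while alive[id1] and alive[id2]:
--         v1 = pick(id1, cur)
--         if v1 is None:
--             if not first_round:
--                 return 1 - id1
--             return 1 - id1 if pick(id2, cur) is not None else -1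
--         mark(v1)
--         alive[id1] -= 1
--         cur = v1
--         v2 = pick(id2, cur)
--         if v2 is None:
--             return 1 - id2
--         mark(v2)
--         alive[id2] -= 1
--         cur = v2
--         first_round = False
--     return None
-- ===== Notes on version B (the rewrite author's own statement) =====
-- stated objective: alternative
-- what changed: Replaces A's per-turn rescans of index-keyed dicts (recomputing letter-difference counts against the current word every turn) by a staged graph algorithm: it precomputes the one-letter-mutation adjacency lists between all pooled words once, then plays the whole game on integer node ids with boolean visited marks propagated to duplicate strings and pool counters, so the game loop itself does no string work.
import Mathlib
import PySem

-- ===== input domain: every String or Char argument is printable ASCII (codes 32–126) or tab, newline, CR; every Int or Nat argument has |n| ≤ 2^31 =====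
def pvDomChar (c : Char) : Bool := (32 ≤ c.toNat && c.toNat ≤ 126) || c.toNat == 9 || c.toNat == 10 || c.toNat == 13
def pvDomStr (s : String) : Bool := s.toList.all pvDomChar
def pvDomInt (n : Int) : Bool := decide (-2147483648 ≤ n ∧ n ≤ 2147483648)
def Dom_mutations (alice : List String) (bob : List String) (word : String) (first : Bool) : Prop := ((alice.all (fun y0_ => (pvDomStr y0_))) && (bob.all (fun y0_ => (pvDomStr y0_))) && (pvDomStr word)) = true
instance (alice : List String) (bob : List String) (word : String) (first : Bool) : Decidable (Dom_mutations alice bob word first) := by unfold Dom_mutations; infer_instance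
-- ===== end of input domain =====

-- B replaces A's per-turn rescans of index-keyed word dicts by a precomputed one-letter-mutation
-- adjacency graph played on integer node ids (objective: alternative); same return value,
-- neither program mutates its arguments.

-- shared helpers (both Pythons evaluate literally these expressions)
-- len(j) == len(set(j))
def pvDistinct (j : String) : Bool := PySem.Str.len j == PySem.Set.len (PySem.Set.ofList j.toList)
-- sum(x != y for x, y in zip(a, b)) == 1
def pvNear (a b : String) : Bool :=
  (((a.toList.zip b.toList).map (fun p => if p.1 ≠ p.2 then (1 : Int) else 0)).sum == 1)
-- j not in visited and sum(k != l for k, l in zip(j, word)) == 1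
def pvCond (visited : PySem.Set String) (word j : String) : Bool :=
  !(PySem.Set.contains visited j) && pvNear j word

-- ===== PORT A =====
-- {i: j for i, j in enumerate(xs) if len(j) == len(set(j))}
def pvTableA (xs : List String) : PySem.Dict Int String :=
  PySem.Dict.ofList ((PySem.List.enumerate xs).filter (fun p => pvDistinct p.2))

-- next((i for i, j in table.items() if j not in visited and sum(k != l for k, l in zip(j, word)) == 1), -1)
def pvSearchA (t : PySem.Dict Int String) (visited : PySem.Set String) (word : String) : Int :=
  match t.items.find? (fun p => pvCond visited word p.2) with
  | some p => p.1
  | none => -1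

-- termination helper for the loop ports (cited by decreasing_by)
lemma pvSearchA_erase_lt (t : PySem.Dict Int String) (v : PySem.Set String) (w : String)
    (h : 0 ≤ pvSearchA t v w) : (t.erase (pvSearchA t v w)).items.length < t.items.length := by
  unfold pvSearchA at h ⊢
  rcases hf : t.items.find? (fun p => pvCond v w p.2) with _ | q
  · rw [hf] at h; simp at h
  · rw [hf]
    have hq := List.mem_of_find?_eq_some hf
    simp only [PySem.Dict.erase]
    exact List.length_filter_lt_length_iff_exists.2 ⟨q, hq, by simp⟩

-- the repeated `if index >= 0: word = table[index]; visited.add(word); table.pop(index)` block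
def pvStep (t : PySem.Dict Int String) (idx : Int) (w : String) (v : PySem.Set String) :
    PySem.Dict Int String × String × PySem.Set String :=
  if 0 ≤ idx then
    let x := t.getD idx ""
    (t.erase idx, x, PySem.Set.add v x)
  else (t, w, v)

lemma pvStep_fst_lt (t : PySem.Dict Int String) (v : PySem.Set String) (w : String)
    (h : 0 ≤ pvSearchA t v w) :
    (pvStep t (pvSearchA t v w) w v).1.items.length < t.items.length := by
  unfold pvStep
  rw [if_pos h]
  exact pvSearchA_erase_lt t v w h

-- the `if not first:` while loop of A (index2 is the loop-carried stale value)
def pvLoopA_nf (t1 t2 : PySem.Dict Int String) (word : String) (visited : PySem.Set String)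
    (first : Bool) (index2 : Int) : Option Int :=
  if t1.items = [] ∨ t2.items = [] then none
  else
    let index1 := pvSearchA t1 visited word
    let st1 := pvStep t1 index1 word visited
    if first = true ∧ 0 ≤ index1 ∧ index2 < 0 then some 0
    else if first = true ∧ 0 ≤ index2 ∧ index1 < 0 then some 1
    else
      let index2' := pvSearchA t2 st1.2.2 st1.2.1
      let st2 := pvStep t2 index2' st1.2.1 st1.2.2
      if 0 ≤ index2' ∧ index1 < 0 then some 1
      else if 0 ≤ index1 ∧ index2' < 0 then some 0
      else if index1 < 0 ∧ index2' < 0 then some (-1)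
      else pvLoopA_nf st1.1 st2.1 st2.2.1 st2.2.2 true index2'
  termination_by t1.items.length
  decreasing_by
    have hi1 : 0 ≤ pvSearchA t1 visited word := by omega
    exact pvStep_fst_lt t1 visited word hi1

-- the `else:` while loop of A
def pvLoopA_f (t1 t2 : PySem.Dict Int String) (word : String) (visited : PySem.Set String)
    (first : Bool) (index2 : Int) : Option Int :=
  if t1.items = [] ∨ t2.items = [] then none
  else
    let index1 := pvSearchA t1 visited word
    let st1 := pvStep t1 index1 word visited
    if first = false ∧ 0 ≤ index1 ∧ index2 < 0 then some 1
    else if first = false ∧ 0 ≤ index2 ∧ index1 < 0 then some 0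
    else
      let index2' := pvSearchA t2 st1.2.2 st1.2.1
      let st2 := pvStep t2 index2' st1.2.1 st1.2.2
      if 0 ≤ index2' ∧ index1 < 0 then some 0
      else if 0 ≤ index1 ∧ index2' < 0 then some 1
      else if index1 < 0 ∧ index2' < 0 then some (-1)
      else pvLoopA_f st1.1 st2.1 st2.2.1 st2.2.2 false index2'
  termination_by t1.items.length
  decreasing_by
    have hi1 : 0 ≤ pvSearchA t1 visited word := by omega
    exact pvStep_fst_lt t1 visited word hi1

def mutations (alice : List String) (bob : List String) (word : String) (first : Bool) : Option Int :=
  let table1 := pvTableA alice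
  let table2 := pvTableA bob
  let tt := if first then (table2, table1) else (table1, table2)
  let visited := PySem.Set.ofList [word]
  if !first then pvLoopA_nf tt.1 tt.2 word visited first 0
  else pvLoopA_f tt.1 tt.2 word visited first 0

-- ===== PORT B =====
-- adj = [([v for v in range(1, 1+n1) if near(words[u], words[v])],
--         [v for v in range(1+n1, n) if near(words[u], words[v])]) for u in range(n)]
def pvAdj (words : List String) (n1 n2 : Nat) : List (List Nat × List Nat) :=
  (List.range words.length).map (fun u =>
    ((List.range' 1 n1).filter (fun v => pvNear (words.getD u "") (words.getD v "")),
     (List.range' (1 + n1) n2).filter (fun v => pvNear (words.getD u "") (words.getD v ""))))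

-- next((v for v in adj[u][side] if not seen[v]), None)
def pvPickG (adj : List (List Nat × List Nat)) (seen : List Bool) (side : Int) (u : Nat) :
    Option Nat :=
  (if side == 0 then (adj.getD u ([], [])).1 else (adj.getD u ([], [])).2).find?
    (fun v => !(seen.getD v false))

-- mark(c): for v in range(n): if words[v] == words[c]: seen[v] = True
def pvMarkG (words : List String) (seen : List Bool) (c : Nat) : List Bool :=
  List.zipWith (fun s w => s || (w == words.getD c "")) seen words

-- the while loop of B over node ids and pool counters
def pvLoopG (adj : List (List Nat × List Nat)) (words : List String) (id1 id2 : Int)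
    (alive1 alive2 : Nat) (seen : List Bool) (cur : Nat) (firstRound : Bool) : Option Int :=
  if h : alive1 = 0 ∨ alive2 = 0 then none
  else
    match pvPickG adj seen id1 cur with
    | none =>
      if firstRound = false then some (1 - id1)
      else if (pvPickG adj seen id2 cur).isSome then some (1 - id1)
      else some (-1)
    | some v1 =>
      let seen1 := pvMarkG words seen v1
      match pvPickG adj seen1 id2 v1 with
      | none => some (1 - id2)
      | some v2 =>
        pvLoopG adj words id1 id2 (alive1 - 1) (alive2 - 1) (pvMarkG words seen1 v2) v2 false
  termination_by alive1
  decreasing_by omega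

def mutations_alt (alice : List String) (bob : List String) (word : String) (first : Bool) :
    Option Int :=
  let pa := alice.filter (fun w => pvDistinct w)
  let pb := bob.filter (fun w => pvDistinct w)
  let words := word :: (pa ++ pb)
  let adj := pvAdj words pa.length pb.length
  let seen0 := pvMarkG words (List.replicate words.length false) 0
  let ids : Int × Int := if first then (1, 0) else (0, 1)
  pvLoopG adj words ids.1 ids.2 (if ids.1 == 0 then pa.length else pb.length)
    (if ids.2 == 0 then pa.length else pb.length) seen0 0 true

-- ===== PRECONDITION & SPEC =====
def Spec_mutations (alice : List String) (bob : List String) (word : String) (first : Bool) (out : Option Int) : Prop := out = mutations_alt alice bob word first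
instance (alice : List String) (bob : List String) (word : String) (first : Bool) (out : Option Int) : Decidable (Spec_mutations alice bob word first out) := by unfold Spec_mutations; infer_instance

-- ===== CLAIM (what is proved, stated in full; the proofs are below) =====
def Claim_equal_mutations : Prop := ∀ (alice : List String) (bob : List String) (word : String) (first : Bool), Dom_mutations alice bob word first → Spec_mutations alice bob word first (mutations alice bob word first)

-- ===== LEMMAS AND PROOFS =====

-- intermediate greedy loop over plain word lists: proof-side stepping stone between A and B
def pvPick (pool : List String) (visited : PySem.Set String) (w : String) : Option String :=
  pool.find? (fun c => pvCond visited w c)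

lemma pvRemove_lt (p : List String) (c : String) (h : c ∈ p) :
    ((PySem.List.remove? p c).getD p).length < p.length := by
  rw [PySem.List.remove?_eq_some_erase p c h]
  have h1 := List.length_erase_of_mem h
  have h2 := List.length_pos_of_mem h
  simp only [Option.getD_some]
  omega

def pvLoopB (p1 p2 : List String) (id1 id2 : Int) (word : String) (visited : PySem.Set String)
    (firstRound : Bool) : Option Int :=
  if p1 = [] ∨ p2 = [] then none
  else
    match hc1 : pvPick p1 visited word with
    | none =>
      if firstRound = false then some (1 - id1)
      else if (pvPick p2 visited word).isSome then some (1 - id1)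
      else some (-1)
    | some c1 =>
      let p1' := (PySem.List.remove? p1 c1).getD p1
      let visited1 := PySem.Set.add visited c1
      match pvPick p2 visited1 c1 with
      | none => some (1 - id2)
      | some c2 =>
        pvLoopB p1' ((PySem.List.remove? p2 c2).getD p2) id1 id2 c2 (PySem.Set.add visited1 c2) false
  termination_by p1.length
  decreasing_by
    exact pvRemove_lt p1 c1 (List.mem_of_find?_eq_some hc1)

-- output relabelling 0 ↔ 1 (−1 and none fixed)
def pvFlip (o : Option Int) : Option Int := o.map (fun x => if x = -1 then -1 else 1 - x)

-- A's second loop is A's first loop with the flag negated and 0/1 swapped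
lemma pvLoopA_flip : ∀ (n : Nat) (t1 t2 : PySem.Dict Int String) (w : String)
    (v : PySem.Set String) (fl : Bool) (i2 : Int), t1.items.length ≤ n →
    pvLoopA_f t1 t2 w v fl i2 = pvFlip (pvLoopA_nf t1 t2 w v (!fl) i2) := by
  intro n
  induction n with
  | zero =>
    intro t1 t2 w v fl i2 hn
    have h0 : t1.items = [] := List.eq_nil_of_length_eq_zero (Nat.le_zero.1 hn)
    rw [pvLoopA_f, pvLoopA_nf]
    simp [h0, pvFlip]
  | succ n ih =>
    intro t1 t2 w v fl i2 hn
    rw [pvLoopA_f, pvLoopA_nf]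
    by_cases hemp : t1.items = [] ∨ t2.items = []
    · simp [hemp, pvFlip]
    · rw [if_neg hemp, if_neg hemp]
      simp only [Bool.not_eq_true']
      by_cases h1 : fl = false ∧ 0 ≤ pvSearchA t1 v w ∧ i2 < 0
      · simp [h1, pvFlip]
      · rw [if_neg h1, if_neg h1]
        by_cases h2 : fl = false ∧ 0 ≤ i2 ∧ pvSearchA t1 v w < 0
        · simp [h2, pvFlip]
        · rw [if_neg h2, if_neg h2]
          by_cases h3 : 0 ≤ pvSearchA t2 (pvStep t1 (pvSearchA t1 v w) w v).2.2
                (pvStep t1 (pvSearchA t1 v w) w v).2.1 ∧ pvSearchA t1 v w < 0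
          · simp [h3, pvFlip]
          · rw [if_neg h3, if_neg h3]
            by_cases h4 : 0 ≤ pvSearchA t1 v w ∧ pvSearchA t2 (pvStep t1 (pvSearchA t1 v w) w v).2.2
                (pvStep t1 (pvSearchA t1 v w) w v).2.1 < 0
            · simp [h4, pvFlip]
            · rw [if_neg h4, if_neg h4]
              by_cases h5 : pvSearchA t1 v w < 0 ∧ pvSearchA t2 (pvStep t1 (pvSearchA t1 v w) w v).2.2
                  (pvStep t1 (pvSearchA t1 v w) w v).2.1 < 0
              · simp [h5, pvFlip]
              · rw [if_neg h5, if_neg h5]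
                have hi1 : 0 ≤ pvSearchA t1 v w := by omega
                have hlt := pvStep_fst_lt t1 v w hi1
                simpa using ih (pvStep t1 (pvSearchA t1 v w) w v).1 _ _ _ false _ (by omega)

-- searching the dict's items = searching its value list
lemma pvPick_eq (e : List (Int × String)) (v : PySem.Set String) (w : String) :
    pvPick (e.map Prod.snd) v w = (e.find? (fun p => pvCond v w p.2)).map Prod.snd := by
  unfold pvPick
  rw [List.find?_map]
  rfl

-- erasing the found key from the dict = erasing the found word from the value list
lemma pvMapSndFilter (e : List (Int × String)) (P : String → Bool) (q : Int × String)
    (hnd : (e.map Prod.fst).Nodup) (hf : e.find? (fun p => P p.2) = some q) :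
    (e.filter (fun p => !(p.1 == q.1))).map Prod.snd = (e.map Prod.snd).erase q.2 := by
  induction e with
  | nil => simp at hf
  | cons p rest ih =>
    rw [List.find?_cons] at hf
    by_cases hp : P p.2
    · simp only [hp] at hf
      injection hf with hf; subst hf
      have hkeys : ∀ r ∈ rest, (!(r.1 == p.1)) = true := by
        intro r hr
        have : r.1 ∈ rest.map Prod.fst := List.mem_map_of_mem hr
        simp only [List.map_cons, List.nodup_cons] at hnd
        have hne : r.1 ≠ p.1 := fun h => hnd.1 (h ▸ this)
        simp [hne]
      rw [List.map_cons, List.erase_cons_head, List.filter_cons_of_neg (by simp),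
          List.filter_eq_self.2 hkeys]
    · simp only [Bool.not_eq_true] at hp
      simp only [hp] at hf
      rw [Bool.eq_false_iff] at hp
      have hq := List.mem_of_find?_eq_some hf
      have hPq : P q.2 = true := by have := List.find?_some hf; simpa using this
      have hne2 : ¬((p.2 == q.2) = true) := by
        intro h
        exact hp (by rw [show p.2 = q.2 from by simpa using h]; exact hPq)
      have hne1 : (!(p.1 == q.1)) = true := by
        simp only [List.map_cons, List.nodup_cons] at hnd
        have : q.1 ∈ rest.map Prod.fst := List.mem_map_of_mem hq
        have hne : p.1 ≠ q.1 := fun h => hnd.1 (h ▸ this)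
        simp [hne]
      rw [List.map_cons, List.erase_cons_tail hne2,
          show List.filter (fun p => !(p.1 == q.1)) (p :: rest)
              = p :: List.filter (fun p => !(p.1 == q.1)) rest from List.filter_cons_of_pos hne1,
          List.map_cons, ih (by simp only [List.map_cons, List.nodup_cons] at hnd; exact hnd.2) hf]

-- one-step equations for pvLoopB
lemma pvB_empty (p1 p2 : List String) (id1 id2 : Int) (w : String) (v : PySem.Set String)
    (fr : Bool) (h : p1 = [] ∨ p2 = []) : pvLoopB p1 p2 id1 id2 w v fr = none := by
  rw [pvLoopB, if_pos h]

lemma pvB_n_false (p1 p2 : List String) (id1 id2 : Int) (w : String) (v : PySem.Set String)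
    (hne : ¬(p1 = [] ∨ p2 = [])) (h : pvPick p1 v w = none) :
    pvLoopB p1 p2 id1 id2 w v false = some (1 - id1) := by
  rw [pvLoopB, if_neg hne]
  split
  · simp
  · rename_i c1 heq; rw [h] at heq; simp at heq

lemma pvB_n_n (p1 p2 : List String) (id1 id2 : Int) (w : String) (v : PySem.Set String)
    (hne : ¬(p1 = [] ∨ p2 = [])) (h1 : pvPick p1 v w = none) (h2 : pvPick p2 v w = none) :
    pvLoopB p1 p2 id1 id2 w v true = some (-1) := by
  rw [pvLoopB, if_neg hne]
  split
  · simp [h2]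
  · rename_i c1 heq; rw [h1] at heq; simp at heq

lemma pvB_n_s (p1 p2 : List String) (id1 id2 : Int) (w : String) (v : PySem.Set String)
    (c2 : String) (hne : ¬(p1 = [] ∨ p2 = []))
    (h1 : pvPick p1 v w = none) (h2 : pvPick p2 v w = some c2) :
    pvLoopB p1 p2 id1 id2 w v true = some (1 - id1) := by
  rw [pvLoopB, if_neg hne]
  split
  · simp [h2]
  · rename_i c1 heq; rw [h1] at heq; simp at heq

lemma pvB_s_n (p1 p2 : List String) (id1 id2 : Int) (w : String) (v : PySem.Set String)
    (fr : Bool) (c1 : String) (hne : ¬(p1 = [] ∨ p2 = []))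
    (h1 : pvPick p1 v w = some c1) (h2 : pvPick p2 (v.add c1) c1 = none) :
    pvLoopB p1 p2 id1 id2 w v fr = some (1 - id2) := by
  rw [pvLoopB, if_neg hne]
  split
  · rename_i heq; rw [h1] at heq; simp at heq
  · rename_i c heq; rw [h1] at heq
    injection heq with heq; subst heq
    dsimp only
    split
    · rfl
    · rename_i c' heq2; rw [h2] at heq2; simp at heq2

lemma pvB_s_s (p1 p2 : List String) (id1 id2 : Int) (w : String) (v : PySem.Set String)
    (fr : Bool) (c1 c2 : String) (hne : ¬(p1 = [] ∨ p2 = []))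
    (h1 : pvPick p1 v w = some c1) (h2 : pvPick p2 (v.add c1) c1 = some c2) :
    pvLoopB p1 p2 id1 id2 w v fr
      = pvLoopB ((PySem.List.remove? p1 c1).getD p1) ((PySem.List.remove? p2 c2).getD p2)
          id1 id2 c2 ((v.add c1).add c2) false := by
  rw [pvLoopB, if_neg hne]
  split
  · rename_i heq; rw [h1] at heq; simp at heq
  · rename_i c heq; rw [h1] at heq
    injection heq with heq; subst heq
    dsimp only
    split
    · rename_i heq2; rw [h2] at heq2; simp at heq2
    · rename_i c' heq2; rw [h2] at heq2
      injection heq2 with heq2; subst heq2; rfl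

-- B's generic loop with ids (1,0) is the same loop with ids (0,1) relabelled
lemma pvLoopB_flip : ∀ (n : Nat) (p1 p2 : List String) (w : String)
    (v : PySem.Set String) (fr : Bool), p1.length ≤ n →
    pvLoopB p1 p2 1 0 w v fr = pvFlip (pvLoopB p1 p2 0 1 w v fr) := by
  intro n
  induction n with
  | zero =>
    intro p1 p2 w v fr hn
    have h0 : p1 = [] := List.eq_nil_of_length_eq_zero (Nat.le_zero.1 hn)
    rw [pvB_empty _ _ _ _ _ _ _ (Or.inl h0), pvB_empty _ _ _ _ _ _ _ (Or.inl h0)]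
    rfl
  | succ n ih =>
    intro p1 p2 w v fr hn
    by_cases hemp : p1 = [] ∨ p2 = []
    · rw [pvB_empty _ _ _ _ _ _ _ hemp, pvB_empty _ _ _ _ _ _ _ hemp]
      rfl
    · cases hc : pvPick p1 v w with
      | none =>
        cases fr with
        | false =>
          rw [pvB_n_false _ _ _ _ _ _ hemp hc, pvB_n_false _ _ _ _ _ _ hemp hc]
          simp [pvFlip]
        | true =>
          cases hc2 : pvPick p2 v w with
          | none =>
            rw [pvB_n_n _ _ _ _ _ _ hemp hc hc2, pvB_n_n _ _ _ _ _ _ hemp hc hc2]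
            simp [pvFlip]
          | some c2 =>
            rw [pvB_n_s _ _ _ _ _ _ _ hemp hc hc2, pvB_n_s _ _ _ _ _ _ _ hemp hc hc2]
            simp [pvFlip]
      | some c1 =>
        cases hc2 : pvPick p2 (PySem.Set.add v c1) c1 with
        | none =>
          rw [pvB_s_n _ _ _ _ _ _ _ _ hemp hc hc2, pvB_s_n _ _ _ _ _ _ _ _ hemp hc hc2]
          simp [pvFlip]
        | some c2 =>
          rw [pvB_s_s _ _ _ _ _ _ _ _ _ hemp hc hc2, pvB_s_s _ _ _ _ _ _ _ _ _ hemp hc hc2]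
          exact ih ((PySem.List.remove? p1 c1).getD p1) ((PySem.List.remove? p2 c2).getD p2)
            c2 ((PySem.Set.add v c1).add c2) false
            (by have := pvRemove_lt p1 c1 (List.mem_of_find?_eq_some hc); omega)

lemma pvErase_items (t : PySem.Dict Int String) (k : Int) :
    (t.erase k).items = t.items.filter (fun p => !(p.1 == k)) := rfl

lemma pvEraseKeys_nodup (t : PySem.Dict Int String) (k : Int)
    (h : (t.items.map Prod.fst).Nodup) : ((t.erase k).items.map Prod.fst).Nodup :=
  (List.Sublist.map Prod.fst List.filter_sublist).nodup h

lemma pvEraseKeys_nonneg (t : PySem.Dict Int String) (k : Int)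
    (h : ∀ j ∈ t.items.map Prod.fst, 0 ≤ j) : ∀ j ∈ (t.erase k).items.map Prod.fst, 0 ≤ j :=
  fun j hj => h j ((List.Sublist.map Prod.fst List.filter_sublist).mem hj)

-- A's first loop = the generic greedy loop with ids (0, 1)
lemma pvLoopAB : ∀ (n : Nat) (t1 t2 : PySem.Dict Int String) (w : String)
    (v : PySem.Set String) (fl : Bool) (i2 : Int), t1.items.length ≤ n →
    (t1.items.map Prod.fst).Nodup → (t2.items.map Prod.fst).Nodup →
    (∀ k ∈ t1.items.map Prod.fst, 0 ≤ k) → (∀ k ∈ t2.items.map Prod.fst, 0 ≤ k) →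
    (fl = true → 0 ≤ i2) →
    pvLoopA_nf t1 t2 w v fl i2 = pvLoopB (t1.items.map Prod.snd) (t2.items.map Prod.snd) 0 1 w v (!fl) := by
  intro n
  induction n with
  | zero =>
    intro t1 t2 w v fl i2 hn hnd1 hnd2 hp1 hp2 hinv
    have h0 : t1.items = [] := List.eq_nil_of_length_eq_zero (Nat.le_zero.1 hn)
    rw [pvLoopA_nf, pvB_empty _ _ _ _ _ _ _ (Or.inl (by simp [h0]))]
    simp [h0]
  | succ n ih =>
    intro t1 t2 w v fl i2 hn hnd1 hnd2 hp1 hp2 hinv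
    by_cases hemp : t1.items = [] ∨ t2.items = []
    · have hemp' : t1.items.map Prod.snd = [] ∨ t2.items.map Prod.snd = [] := by
        rcases hemp with h | h <;> simp [h]
      rw [pvLoopA_nf, if_pos hemp, pvB_empty _ _ _ _ _ _ _ hemp']
    · have hemp' : ¬(t1.items.map Prod.snd = [] ∨ t2.items.map Prod.snd = []) := by
        simpa only [List.map_eq_nil_iff] using hemp
      rw [pvLoopA_nf, if_neg hemp]
      rcases hf1 : t1.items.find? (fun p => pvCond v w p.2) with _ | q1
      · -- player 1 finds nothing
        have hi1 : pvSearchA t1 v w = -1 := by unfold pvSearchA; rw [hf1]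
        have hpick1 : pvPick (t1.items.map Prod.snd) v w = none := by
          rw [pvPick_eq, hf1]; rfl
        simp only [hi1, pvStep]
        norm_num
        cases fl with
        | true =>
          have h02 := hinv rfl
          rw [show (!true) = false from rfl, pvB_n_false _ _ _ _ _ _ hemp' hpick1]
          simp [h02]
        | false =>
          rcases hf2 : t2.items.find? (fun p => pvCond v w p.2) with _ | q2
          · have hi2 : pvSearchA t2 v w = -1 := by unfold pvSearchA; rw [hf2]
            have hpick2 : pvPick (t2.items.map Prod.snd) v w = none := by
              rw [pvPick_eq, hf2]; rfl
            rw [show (!false) = true from rfl, pvB_n_n _ _ _ _ _ _ hemp' hpick1 hpick2]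
            simp [hi2]
          · have hi2 : pvSearchA t2 v w = q2.1 := by unfold pvSearchA; rw [hf2]
            have h02 : 0 ≤ q2.1 := hp2 q2.1 (List.mem_map_of_mem (List.mem_of_find?_eq_some hf2))
            have hpick2 : pvPick (t2.items.map Prod.snd) v w = some q2.2 := by
              rw [pvPick_eq, hf2]; rfl
            rw [show (!false) = true from rfl, pvB_n_s _ _ _ _ _ _ _ hemp' hpick1 hpick2]
            simp [hi2, h02]
      · -- player 1 finds q1
        have hq1 : q1 ∈ t1.items := List.mem_of_find?_eq_some hf1
        have hi1 : pvSearchA t1 v w = q1.1 := by unfold pvSearchA; rw [hf1]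
        have h01 : 0 ≤ q1.1 := hp1 q1.1 (List.mem_map_of_mem hq1)
        have hgd : t1.getD q1.1 "" = q1.2 :=
          PySem.Dict.getD_of_mem_items t1 (by simpa using hq1) hnd1 ""
        have hstep1 : pvStep t1 q1.1 w v = (t1.erase q1.1, q1.2, v.add q1.2) := by
          unfold pvStep
          rw [if_pos h01, hgd]
        have hpick1 : pvPick (t1.items.map Prod.snd) v w = some q1.2 := by
          rw [pvPick_eq, hf1]; rfl
        have hmem1 : q1.2 ∈ t1.items.map Prod.snd := List.mem_map_of_mem hq1
        have hrem1 : (PySem.List.remove? (t1.items.map Prod.snd) q1.2).getD (t1.items.map Prod.snd)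
            = (t1.items.map Prod.snd).erase q1.2 := by
          rw [PySem.List.remove?_eq_some_erase _ _ hmem1]; rfl
        have hersnd1 : (t1.erase q1.1).items.map Prod.snd = (t1.items.map Prod.snd).erase q1.2 := by
          rw [pvErase_items]; exact pvMapSndFilter t1.items _ q1 hnd1 hf1
        have hg1 : ¬(fl = true ∧ 0 ≤ q1.1 ∧ i2 < 0) := by
          rintro ⟨hfl, -, hlt⟩; have := hinv hfl; omega
        have hg2 : ¬(fl = true ∧ 0 ≤ i2 ∧ q1.1 < 0) := by
          rintro ⟨-, -, hlt⟩; omega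
        simp only [hi1, hstep1]
        rw [if_neg hg1, if_neg hg2]
        rcases hf2 : t2.items.find? (fun p => pvCond (v.add q1.2) q1.2 p.2) with _ | q2
        · have hi2 : pvSearchA t2 (v.add q1.2) q1.2 = -1 := by unfold pvSearchA; rw [hf2]
          have hpick2 : pvPick (t2.items.map Prod.snd) (v.add q1.2) q1.2 = none := by
            rw [pvPick_eq, hf2]; rfl
          rw [pvB_s_n _ _ _ _ _ _ _ _ hemp' hpick1 hpick2]
          simp [hi2, h01]
        · have hq2 : q2 ∈ t2.items := List.mem_of_find?_eq_some hf2
          have hi2 : pvSearchA t2 (v.add q1.2) q1.2 = q2.1 := by unfold pvSearchA; rw [hf2]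
          have h02 : 0 ≤ q2.1 := hp2 q2.1 (List.mem_map_of_mem hq2)
          have hgd2 : t2.getD q2.1 "" = q2.2 :=
            PySem.Dict.getD_of_mem_items t2 (by simpa using hq2) hnd2 ""
          have hstep2 : pvStep t2 q2.1 q1.2 (v.add q1.2)
              = (t2.erase q2.1, q2.2, (v.add q1.2).add q2.2) := by
            unfold pvStep
            rw [if_pos h02, hgd2]
          have hpick2 : pvPick (t2.items.map Prod.snd) (v.add q1.2) q1.2 = some q2.2 := by
            rw [pvPick_eq, hf2]; rfl
          have hmem2 : q2.2 ∈ t2.items.map Prod.snd := List.mem_map_of_mem hq2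
          have hrem2 : (PySem.List.remove? (t2.items.map Prod.snd) q2.2).getD (t2.items.map Prod.snd)
              = (t2.items.map Prod.snd).erase q2.2 := by
            rw [PySem.List.remove?_eq_some_erase _ _ hmem2]; rfl
          have hersnd2 : (t2.erase q2.1).items.map Prod.snd = (t2.items.map Prod.snd).erase q2.2 := by
            rw [pvErase_items]; exact pvMapSndFilter t2.items _ q2 hnd2 hf2
          have hg3 : ¬(0 ≤ q2.1 ∧ q1.1 < 0) := by rintro ⟨-, h⟩; omega
          have hg4 : ¬(0 ≤ q1.1 ∧ q2.1 < 0) := by rintro ⟨-, h⟩; omega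
          have hg5 : ¬(q1.1 < 0 ∧ q2.1 < 0) := by rintro ⟨h, -⟩; omega
          simp only [hi2, hstep2]
          rw [if_neg hg3, if_neg hg4, if_neg hg5]
          rw [pvB_s_s _ _ _ _ _ _ _ _ _ hemp' hpick1 hpick2, hrem1, hrem2, ← hersnd1, ← hersnd2]
          have hlen : (t1.erase q1.1).items.length ≤ n := by
            have : (t1.erase q1.1).items.length < t1.items.length :=
              List.length_filter_lt_length_iff_exists.2 ⟨q1, hq1, by simp⟩
            omega
          have := ih (t1.erase q1.1) (t2.erase q2.1) q2.2 ((v.add q1.2).add q2.2) true q2.1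
            hlen (pvEraseKeys_nodup t1 q1.1 hnd1) (pvEraseKeys_nodup t2 q2.1 hnd2)
            (pvEraseKeys_nonneg t1 q1.1 hp1) (pvEraseKeys_nonneg t2 q2.1 hp2) (fun _ => h02)
          simpa using this

lemma pvEnumFilter_nodup (xs : List String) :
    (((PySem.List.enumerate xs).filter (fun p => pvDistinct p.2)).map Prod.fst).Nodup := by
  have h : List.Pairwise (fun p q : Int × String => p.1 < q.1)
      ((PySem.List.enumerate xs).filter (fun p => pvDistinct p.2)) :=
    (PySem.List.pairwise_lt_enumerate xs 0).sublist List.filter_sublist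
  exact (List.pairwise_map.mpr h).imp fun hlt => ne_of_lt hlt

set_option maxHeartbeats 1000000 in
lemma pvTableA_items (xs : List String) :
    (pvTableA xs).items = (PySem.List.enumerate xs).filter (fun p => pvDistinct p.2) := by
  unfold pvTableA PySem.Dict.ofList PySem.Dict.update
  have h := PySem.Dict.items_foldl_insert_fresh
      ((PySem.List.enumerate xs).filter (fun p => pvDistinct p.2)) (fun p => p.1) (fun p => p.2)
      PySem.Dict.empty (fun a _ => by simp [pysem]) (pvEnumFilter_nodup xs)
  exact h.trans (by simp [PySem.Dict.empty])

lemma pvTableA_values (xs : List String) :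
    (pvTableA xs).items.map Prod.snd = xs.filter (fun w => pvDistinct w) := by
  rw [pvTableA_items]
  have := PySem.List.map_snd_enumerate xs 0
  calc ((PySem.List.enumerate xs).filter (fun p => pvDistinct p.2)).map Prod.snd
      = ((PySem.List.enumerate xs).filter ((fun w => pvDistinct w) ∘ Prod.snd)).map Prod.snd := rfl
    _ = ((PySem.List.enumerate xs).map Prod.snd).filter (fun w => pvDistinct w) := by
        rw [List.filter_map]
    _ = xs.filter (fun w => pvDistinct w) := by
        rw [show (PySem.List.enumerate xs).map Prod.snd = xs from this]

lemma pvTableA_nodup (xs : List String) : ((pvTableA xs).items.map Prod.fst).Nodup := by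
  rw [pvTableA_items]; exact pvEnumFilter_nodup xs

lemma pvTableA_nonneg (xs : List String) : ∀ k ∈ (pvTableA xs).items.map Prod.fst, 0 ≤ k := by
  rw [pvTableA_items]
  intro k hk
  rcases List.mem_map.1 hk with ⟨p, hp, rfl⟩
  have hp' : p ∈ PySem.List.enumerate xs := (List.mem_filter.1 hp).1
  have : p.1 ∈ (PySem.List.enumerate xs).map Prod.fst := List.mem_map_of_mem hp'
  rw [show (PySem.List.enumerate xs).map Prod.fst = (PySem.List.enumerate xs).map (fun x => x.1) from rfl,
      PySem.List.map_fst_enumerate] at this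
  exact (PySem.List.mem_pyRange_one.1 this).1

-- ===== bridge: the generic greedy loop over word lists = B's graph loop =====

-- Boolean membership in an updated set
lemma pvContains_add (V : PySem.Set String) (x y : String) :
    (PySem.Set.add V y).contains x = (V.contains x || (x == y)) := by
  simp [PySem.Set.add, PySem.Set.contains, beq_eq_decide]
  split
  · rename_i h
    by_cases hxy : x = y
    · subst hxy; simp_all
    · simp [hxy]
  · simp

lemma pvContains_singleton (x w : String) :
    (PySem.Set.ofList [w]).contains x = (x == w) := by
  simp [PySem.Set.ofList, PySem.Set.add, PySem.Set.contains, PySem.Set.empty, beq_eq_decide]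

-- `p` is `pool` with some visited words deleted
inductive pvSub (V : PySem.Set String) : List String → List String → Prop
  | nil : pvSub V [] []
  | keep (x : String) {l p : List String} : pvSub V l p → pvSub V (x :: l) (x :: p)
  | drop (x : String) {l p : List String} : V.contains x = true → pvSub V l p → pvSub V (x :: l) p

lemma pvSub_refl (V : PySem.Set String) (l : List String) : pvSub V l l := by
  induction l with
  | nil => exact .nil
  | cons x xs ih => exact .keep x ih

lemma pvSub_mono (V : PySem.Set String) (c : String) {pool p : List String}
    (h : pvSub V pool p) : pvSub (V.add c) pool p := by
  induction h with
  | nil => exact .nil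
  | keep x _ ih => exact .keep x ih
  | drop x hx _ ih => exact .drop x (by rw [pvContains_add, hx]; rfl) ih

lemma pvSub_find? (V : PySem.Set String) (w : String) {pool p : List String}
    (h : pvSub V pool p) :
    p.find? (fun c => pvCond V w c) = pool.find? (fun c => pvCond V w c) := by
  induction h with
  | nil => rfl
  | keep x _ ih =>
    rw [List.find?_cons, List.find?_cons]
    cases hc : pvCond V w x <;> simp [ih]
  | drop x hx _ ih =>
    have hfx : pvCond V w x = false := by
      simp only [pvCond, hx, Bool.not_true, Bool.false_and]
    rw [List.find?_cons, hfx]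
    simpa using ih

lemma pvSub_erase (V : PySem.Set String) (w : String) {pool p : List String}
    (h : pvSub V pool p) (c : String)
    (hf : p.find? (fun j => pvCond V w j) = some c) :
    pvSub (V.add c) pool (p.erase c) := by
  induction h with
  | nil => simp at hf
  | keep x hsub ih =>
    rw [List.find?_cons] at hf
    by_cases hc : pvCond V w x
    · rw [hc] at hf
      injection hf with hf
      subst hf
      rw [List.erase_cons_head]
      exact .drop x (by rw [pvContains_add]; simp) (pvSub_mono V x hsub)
    · rw [Bool.not_eq_true] at hc
      rw [hc] at hf
      have hxc : x ≠ c := by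
        intro he
        have := List.find?_some hf
        rw [← he] at this
        simp [hc] at this
      rw [List.erase_cons_tail (by simpa using hxc)]
      exact .keep x (ih hf)
  | drop x hx _ ih =>
    exact .drop x (by rw [pvContains_add, hx]; rfl) (ih hf)

-- find? over a filtered list
lemma pvFindFilter {α : Type} (l : List α) (p q : α → Bool) :
    (l.filter q).find? p = l.find? (fun x => q x && p x) := by
  induction l with
  | nil => rfl
  | cons x xs ih =>
    by_cases hq : q x
    · rw [List.filter_cons_of_pos hq, List.find?_cons, List.find?_cons]
      simp [hq]
    · rw [List.filter_cons_of_neg (by simp [hq]), List.find?_cons]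
      simp [hq, ih]

-- find? respects pointwise-equal predicates
lemma pvFindCongr {α : Type} (l : List α) (p q : α → Bool)
    (h : ∀ x ∈ l, p x = q x) : l.find? p = l.find? q := by
  induction l with
  | nil => rfl
  | cons x xs ih =>
    rw [List.find?_cons, List.find?_cons, h x (by simp)]
    cases q x
    · exact ih fun y hy => h y (by simp [hy])
    · rfl

lemma pvNear_comm (a b : String) : pvNear a b = pvNear b a := by
  simp only [pvNear]
  congr 1
  rw [← List.zip_swap a.toList b.toList, List.map_map]
  congr 1
  apply List.map_congr_left
  intro p _
  simp [Prod.swap, eq_comm]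

-- slice of a concatenation read back by getD over an index range
lemma pvSegMap (pre l post : List String) :
    (List.range' pre.length l.length).map (fun v => (pre ++ (l ++ post)).getD v "") = l := by
  induction l generalizing pre with
  | nil => simp
  | cons x xs ih =>
    rw [show (x :: xs).length = xs.length + 1 from rfl, List.range'_succ, List.map_cons]
    congr 1
    · simp [List.getD]
    · have := ih (pre ++ [x])
      simpa [List.append_assoc] using this

lemma pvMapW0 (word : String) (pa pb : List String) :
    (List.range' 1 pa.length).map (fun v => (word :: (pa ++ pb)).getD v "") = pa := by
  simpa using pvSegMap [word] pa pb

lemma pvMapW1 (word : String) (pa pb : List String) :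
    (List.range' (1 + pa.length) pb.length).map (fun v => (word :: (pa ++ pb)).getD v "") = pb := by
  have := pvSegMap (word :: pa) pb []
  simpa [Nat.add_comm] using this

lemma pvAdj_getD (words : List String) (n1 n2 : Nat) (u : Nat) (h : u < words.length) :
    (pvAdj words n1 n2).getD u ([], []) =
      ((List.range' 1 n1).filter (fun v => pvNear (words.getD u "") (words.getD v "")),
       (List.range' (1 + n1) n2).filter (fun v => pvNear (words.getD u "") (words.getD v ""))) := by
  simp [pvAdj, List.getD, h]

lemma pvMarkG_length (words : List String) (seen : List Bool) (c : Nat)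
    (h : seen.length = words.length) : (pvMarkG words seen c).length = words.length := by
  simp [pvMarkG, h]

lemma pvMarkG_getD (words : List String) (seen : List Bool) (c v : Nat)
    (hlen : seen.length = words.length) (hv : v < words.length) :
    (pvMarkG words seen c).getD v false
      = (seen.getD v false || (words.getD v "" == words.getD c "")) := by
  simp [pvMarkG, List.getD, hlen, hv]

-- find? over a map of getD-reads against find? over a filtered index range
lemma pvFindMapFilter (L : List String) (rng : List Nat) (P : String → Bool)
    (Q R : Nat → Bool) (h : ∀ v ∈ rng, P (L.getD v "") = (Q v && R v)) :
    (rng.map (fun v => L.getD v "")).find? P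
      = ((rng.filter Q).find? R).map (fun v => L.getD v "") := by
  rw [List.find?_map, pvFindFilter]
  congr 1
  exact pvFindCongr rng _ _ h

-- a one-sided pick over the current pool list = the graph pick over the adjacency list
lemma pvPickCorr (word : String) (pa pb : List String) (V : PySem.Set String)
    (seen : List Bool) (id : Int) (cur : Nat) (p : List String)
    (hid : id = 0 ∨ id = 1)
    (hsub : pvSub V (if id == 0 then pa else pb) p)
    (hlen : seen.length = (word :: (pa ++ pb)).length)
    (hseen : ∀ v, v < (word :: (pa ++ pb)).length →
        seen.getD v false = V.contains ((word :: (pa ++ pb)).getD v ""))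
    (hcur : cur < (word :: (pa ++ pb)).length) :
    pvPick p V ((word :: (pa ++ pb)).getD cur "")
      = (pvPickG (pvAdj (word :: (pa ++ pb)) pa.length pb.length) seen id cur).map
          (fun v => (word :: (pa ++ pb)).getD v "") := by
  have hrange : ∀ v, (v ∈ List.range' 1 pa.length ∨ v ∈ List.range' (1 + pa.length) pb.length) →
      v < (word :: (pa ++ pb)).length := by
    intro v hv
    have hWlen : (word :: (pa ++ pb)).length = 1 + pa.length + pb.length := by simp; omega
    rw [hWlen]
    rcases hv with hv | hv <;> · have := List.mem_range'_1.1 hv; omega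
  unfold pvPick pvPickG
  rw [pvAdj_getD _ _ _ _ hcur]
  set w := (word :: (pa ++ pb)).getD cur "" with hw
  have hcell : ∀ v, v < (word :: (pa ++ pb)).length →
      pvCond V w ((word :: (pa ++ pb)).getD v "")
        = (pvNear w ((word :: (pa ++ pb)).getD v "") && !(seen.getD v false)) := by
    intro v hv
    simp only [pvCond, hseen v hv]
    rw [pvNear_comm, Bool.and_comm]
  rcases hid with hid | hid <;> subst hid
  · simp only [show ((0 : Int) == 0) = true from rfl, if_pos] at hsub ⊢
    rw [pvSub_find? V _ hsub]
    conv_lhs => rw [← pvMapW0 word pa pb]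
    exact pvFindMapFilter _ _ _ _ _ (fun v hv => hcell v (hrange v (Or.inl hv)))
  · simp only [show ((1 : Int) == 0) = false from rfl, Bool.false_eq_true] at hsub ⊢
    rw [pvSub_find? V _ hsub]
    conv_lhs => rw [← pvMapW1 word pa pb]
    exact pvFindMapFilter _ _ _ _ _ (fun v hv => hcell v (hrange v (Or.inr hv)))

-- a graph pick returns a node of the pooled index range
lemma pvPickG_mem (word : String) (pa pb : List String) (seen : List Bool) (id : Int)
    (cur v1 : Nat) (hcur : cur < (word :: (pa ++ pb)).length)
    (h : pvPickG (pvAdj (word :: (pa ++ pb)) pa.length pb.length) seen id cur = some v1) :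
    v1 < (word :: (pa ++ pb)).length := by
  unfold pvPickG at h
  rw [pvAdj_getD _ _ _ _ hcur] at h
  have hWlen : (word :: (pa ++ pb)).length = 1 + pa.length + pb.length := by
    simp; omega
  rw [hWlen]
  by_cases hid : (id == 0) = true
  · rw [if_pos hid] at h
    have := List.mem_of_find?_eq_some h
    have := (List.mem_filter.1 this).1
    have := List.mem_range'_1.1 this
    omega
  · rw [if_neg hid] at h
    have := List.mem_of_find?_eq_some h
    have := (List.mem_filter.1 this).1
    have := List.mem_range'_1.1 this
    omega

-- the main bridge: the greedy loop over word lists equals B's graph loop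
lemma pvLoopBG (word : String) (pa pb : List String) :
    ∀ (fuel : Nat) (p1 p2 : List String) (id1 id2 : Int) (V : PySem.Set String)
      (seen : List Bool) (cur : Nat) (fr : Bool),
    p1.length ≤ fuel →
    ((id1 = 0 ∧ id2 = 1) ∨ (id1 = 1 ∧ id2 = 0)) →
    pvSub V (if id1 == 0 then pa else pb) p1 →
    pvSub V (if id2 == 0 then pa else pb) p2 →
    seen.length = (word :: (pa ++ pb)).length →
    (∀ v, v < (word :: (pa ++ pb)).length →
        seen.getD v false = V.contains ((word :: (pa ++ pb)).getD v "")) →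
    cur < (word :: (pa ++ pb)).length →
    pvLoopB p1 p2 id1 id2 ((word :: (pa ++ pb)).getD cur "") V fr
      = pvLoopG (pvAdj (word :: (pa ++ pb)) pa.length pb.length) (word :: (pa ++ pb))
          id1 id2 p1.length p2.length seen cur fr := by
  intro fuel
  induction fuel with
  | zero =>
    intro p1 p2 id1 id2 V seen cur fr hfuel hid hs1 hs2 hlen hseen hcur
    have h0 : p1 = [] := List.eq_nil_of_length_eq_zero (Nat.le_zero.1 hfuel)
    rw [pvB_empty _ _ _ _ _ _ _ (Or.inl h0), pvLoopG]
    simp [h0]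
  | succ fuel ih =>
    intro p1 p2 id1 id2 V seen cur fr hfuel hid hs1 hs2 hlen hseen hcur
    by_cases hemp : p1 = [] ∨ p2 = []
    · rw [pvB_empty _ _ _ _ _ _ _ hemp, pvLoopG]
      have : p1.length = 0 ∨ p2.length = 0 := by
        rcases hemp with h | h <;> simp [h]
      rw [dif_pos this]
    · have hne : ¬(p1.length = 0 ∨ p2.length = 0) := by
        simp only [List.length_eq_zero_iff]
        exact hemp
      rw [pvLoopG, dif_neg hne]
      rcases hpg1 : pvPickG (pvAdj (word :: (pa ++ pb)) pa.length pb.length) seen id1 cur with _ | v1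
      · -- side 1 has no move
        have hpick1 : pvPick p1 V ((word :: (pa ++ pb)).getD cur "") = none := by
          rw [pvPickCorr word pa pb V seen id1 cur p1
              (by rcases hid with ⟨h, _⟩ | ⟨h, _⟩ <;> simp [h]) hs1 hlen hseen hcur, hpg1]
          rfl
        cases fr with
        | false =>
          rw [pvB_n_false _ _ _ _ _ _ hemp hpick1]
          rfl
        | true =>
          rcases hpg2 : pvPickG (pvAdj (word :: (pa ++ pb)) pa.length pb.length) seen id2 cur with _ | v2
          · have hpick2 : pvPick p2 V ((word :: (pa ++ pb)).getD cur "") = none := by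
              rw [pvPickCorr word pa pb V seen id2 cur p2
                  (by rcases hid with ⟨_, h⟩ | ⟨_, h⟩ <;> simp [h]) hs2 hlen hseen hcur, hpg2]
              rfl
            rw [pvB_n_n _ _ _ _ _ _ hemp hpick1 hpick2]
            simp
          · have hpick2 : pvPick p2 V ((word :: (pa ++ pb)).getD cur "")
                = some ((word :: (pa ++ pb)).getD v2 "") := by
              rw [pvPickCorr word pa pb V seen id2 cur p2
                  (by rcases hid with ⟨_, h⟩ | ⟨_, h⟩ <;> simp [h]) hs2 hlen hseen hcur, hpg2]
              rfl
            rw [pvB_n_s _ _ _ _ _ _ _ hemp hpick1 hpick2]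
            simp
      · -- side 1 moves to node v1
        have hv1 : v1 < (word :: (pa ++ pb)).length := pvPickG_mem word pa pb seen id1 cur v1 hcur hpg1
        have hpick1 : pvPick p1 V ((word :: (pa ++ pb)).getD cur "")
            = some ((word :: (pa ++ pb)).getD v1 "") := by
          rw [pvPickCorr word pa pb V seen id1 cur p1
              (by rcases hid with ⟨h, _⟩ | ⟨h, _⟩ <;> simp [h]) hs1 hlen hseen hcur, hpg1]
          rfl
        set c1 := (word :: (pa ++ pb)).getD v1 "" with hc1
        have hmem1 : c1 ∈ p1 := List.mem_of_find?_eq_some hpick1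
        have hlen1 : (pvMarkG (word :: (pa ++ pb)) seen v1).length = (word :: (pa ++ pb)).length :=
          pvMarkG_length _ _ _ hlen
        have hseen1 : ∀ v, v < (word :: (pa ++ pb)).length →
            (pvMarkG (word :: (pa ++ pb)) seen v1).getD v false
              = (V.add c1).contains ((word :: (pa ++ pb)).getD v "") := by
          intro v hv
          rw [pvMarkG_getD _ _ _ _ hlen hv, hseen v hv, pvContains_add]
        have hsub1' : pvSub (V.add c1) (if id1 == 0 then pa else pb) (p1.erase c1) :=
          pvSub_erase V _ hs1 c1 hpick1
        have hsub2' : pvSub (V.add c1) (if id2 == 0 then pa else pb) p2 := pvSub_mono V c1 hs2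
        rcases hpg2 : pvPickG (pvAdj (word :: (pa ++ pb)) pa.length pb.length)
            (pvMarkG (word :: (pa ++ pb)) seen v1) id2 v1 with _ | v2
        · have hpick2 : pvPick p2 (V.add c1) c1 = none := by
            rw [hc1, pvPickCorr word pa pb (V.add c1) (pvMarkG (word :: (pa ++ pb)) seen v1) id2 v1 p2
                (by rcases hid with ⟨_, h⟩ | ⟨_, h⟩ <;> simp [h]) hsub2' hlen1 hseen1 hv1, hpg2]
            rfl
          rw [pvB_s_n _ _ _ _ _ _ _ _ hemp hpick1 hpick2]
          simp [hpg2]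
        · have hv2 : v2 < (word :: (pa ++ pb)).length :=
            pvPickG_mem word pa pb (pvMarkG (word :: (pa ++ pb)) seen v1) id2 v1 v2 hv1 hpg2
          set c2 := (word :: (pa ++ pb)).getD v2 "" with hc2
          have hpick2 : pvPick p2 (V.add c1) c1 = some c2 := by
            rw [hc1, pvPickCorr word pa pb (V.add c1) (pvMarkG (word :: (pa ++ pb)) seen v1) id2 v1 p2
                (by rcases hid with ⟨_, h⟩ | ⟨_, h⟩ <;> simp [h]) hsub2' hlen1 hseen1 hv1, hpg2]
            rfl
          have hmem2 : c2 ∈ p2 := List.mem_of_find?_eq_some hpick2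
          rw [pvB_s_s _ _ _ _ _ _ _ _ _ hemp hpick1 hpick2]
          rw [PySem.List.remove?_eq_some_erase _ _ hmem1, PySem.List.remove?_eq_some_erase _ _ hmem2]
          simp only [Option.getD_some]
          have hfuel' : (p1.erase c1).length ≤ fuel := by
            have := List.length_erase_of_mem hmem1
            have := List.length_pos_of_mem hmem1
            omega
          have hsub2'' : pvSub ((V.add c1).add c2) (if id2 == 0 then pa else pb) (p2.erase c2) :=
            pvSub_erase (V.add c1) c1 hsub2' c2 hpick2
          have hsub1'' : pvSub ((V.add c1).add c2) (if id1 == 0 then pa else pb) (p1.erase c1) :=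
            pvSub_mono (V.add c1) c2 hsub1'
          have hlen2 : (pvMarkG (word :: (pa ++ pb)) (pvMarkG (word :: (pa ++ pb)) seen v1) v2).length
              = (word :: (pa ++ pb)).length := pvMarkG_length _ _ _ hlen1
          have hseen2 : ∀ v, v < (word :: (pa ++ pb)).length →
              (pvMarkG (word :: (pa ++ pb)) (pvMarkG (word :: (pa ++ pb)) seen v1) v2).getD v false
                = ((V.add c1).add c2).contains ((word :: (pa ++ pb)).getD v "") := by
            intro v hv
            rw [pvMarkG_getD _ _ _ _ hlen1 hv, hseen1 v hv,
                pvContains_add (PySem.Set.add V c1) ((word :: (pa ++ pb)).getD v "") c2, hc2]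
          have := ih (p1.erase c1) (p2.erase c2) id1 id2 ((V.add c1).add c2)
            (pvMarkG (word :: (pa ++ pb)) (pvMarkG (word :: (pa ++ pb)) seen v1) v2) v2 false
            hfuel' hid hsub1'' hsub2'' hlen2 hseen2 hv2
          rw [this]
          have hl1 : (p1.erase c1).length = p1.length - 1 := List.length_erase_of_mem hmem1
          have hl2 : (p2.erase c2).length = p2.length - 1 := List.length_erase_of_mem hmem2
          rw [hl1, hl2, hpg2]

-- initial seen array: only duplicates of the start word are marked
lemma pvSeen0 (word : String) (pa pb : List String) :
    ∀ v, v < (word :: (pa ++ pb)).length →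
      (pvMarkG (word :: (pa ++ pb)) (List.replicate (word :: (pa ++ pb)).length false) 0).getD v false
        = (PySem.Set.ofList [word]).contains ((word :: (pa ++ pb)).getD v "") := by
  intro v hv
  rw [pvMarkG_getD _ _ _ _ (by simp) hv, pvContains_singleton]
  have : (List.replicate (word :: (pa ++ pb)).length false).getD v false = false := by
    simp [List.getD]
  rw [this]
  simp

-- ===== VERDICT (by name: the statement is the Claim_ definition above) =====
theorem mutations_spec : Claim_equal_mutations := by
  intro alice bob word first _
  unfold Spec_mutations mutations mutations_alt
  cases first with
  | false =>
    show pvLoopA_nf (pvTableA alice) (pvTableA bob) word (PySem.Set.ofList [word]) false 0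
        = pvLoopG _ _ (0 : Int) (1 : Int) _ _ _ 0 true
    rw [pvLoopAB (pvTableA alice).items.length _ _ _ _ _ _ le_rfl
          (pvTableA_nodup alice) (pvTableA_nodup bob)
          (pvTableA_nonneg alice) (pvTableA_nonneg bob) (by simp)]
    rw [pvTableA_values, pvTableA_values]
    have := pvLoopBG word (alice.filter (fun w => pvDistinct w)) (bob.filter (fun w => pvDistinct w))
      (alice.filter (fun w => pvDistinct w)).length
      (alice.filter (fun w => pvDistinct w)) (bob.filter (fun w => pvDistinct w))
      0 1 (PySem.Set.ofList [word])
      (pvMarkG (word :: (alice.filter (fun w => pvDistinct w) ++ bob.filter (fun w => pvDistinct w)))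
        (List.replicate (word :: (alice.filter (fun w => pvDistinct w) ++ bob.filter (fun w => pvDistinct w))).length false) 0)
      0 true le_rfl (Or.inl ⟨rfl, rfl⟩)
      (by simpa using pvSub_refl _ _) (by simpa using pvSub_refl _ _)
      (by simp [pvMarkG_length]) (pvSeen0 word _ _) (by simp)
    simpa using this
  | true =>
    show pvLoopA_f (pvTableA bob) (pvTableA alice) word (PySem.Set.ofList [word]) true 0
        = pvLoopG _ _ (1 : Int) (0 : Int) _ _ _ 0 true
    rw [pvLoopA_flip (pvTableA bob).items.length _ _ _ _ _ _ le_rfl]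
    rw [pvLoopAB (pvTableA bob).items.length _ _ _ _ _ _ le_rfl
          (pvTableA_nodup bob) (pvTableA_nodup alice)
          (pvTableA_nonneg bob) (pvTableA_nonneg alice) (by simp)]
    rw [pvTableA_values, pvTableA_values]
    rw [← pvLoopB_flip (bob.filter (fun w => pvDistinct w)).length _ _ _ _ _ le_rfl]
    have := pvLoopBG word (alice.filter (fun w => pvDistinct w)) (bob.filter (fun w => pvDistinct w))
      (bob.filter (fun w => pvDistinct w)).length
      (bob.filter (fun w => pvDistinct w)) (alice.filter (fun w => pvDistinct w))
      1 0 (PySem.Set.ofList [word])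
      (pvMarkG (word :: (alice.filter (fun w => pvDistinct w) ++ bob.filter (fun w => pvDistinct w)))
        (List.replicate (word :: (alice.filter (fun w => pvDistinct w) ++ bob.filter (fun w => pvDistinct w))).length false) 0)
      0 true le_rfl (Or.inr ⟨rfl, rfl⟩)
      (by simpa using pvSub_refl _ _) (by simpa using pvSub_refl _ _)
      (by simp [pvMarkG_length]) (pvSeen0 word _ _) (by simp)
    simpa using this
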